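-- pv_equiv track=rewrite | github.com/MrBrantCode/unitest_baseline | mut_generate/mist_train_taco/taco_17694/solution.py | min_soldiers_to_win_war
-- ===== SOURCE A (Python) =====
-- def min_soldiers_to_win_war(arr, K):
--     n = len(arr)
--     count = 0
--     a = []
--
--     # Count the number of lucky troops
--     for i in range(n):
--         if arr[i] % K == 0:
--             count += 1
--         else:
--             # Calculate the number of soldiers needed to make the troop lucky
--             d = K - (arr[i] % K)
--             a.append(d)
--
--     # Sort the list of soldiers needed to make troops lucky
--     a.sort()
--
--     # Determine the minimum number of soldiers needed to win the war
--     if n % 2 == 0: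
--         required_lucky_troops = n // 2
--     else:
--         required_lucky_troops = n // 2 + 1
--
--     if count >= required_lucky_troops:
--         return 0
--
--     # Calculate the minimum soldiers needed to reach the required lucky troops
--     soldiers_needed = sum(a[:required_lucky_troops - count])
--     return soldiers_needed
-- ===== SOURCE B (Python) =====
-- def min_soldiers_to_win_war(arr, K):
--     n = len(arr)
--     deficits = [K - x % K for x in arr if x % K != 0]
--     count = n - len(deficits)
--     required = (n + 1) // 2
--     t = required - count
--     if t <= 0:
--         return 0
--     # Binary search (by value) for d = the t-th smallest deficit, then sum in one pass:
--     # sum of the t smallest = sum of all deficits < d, plus (t - #{< d}) copies of d.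
--     lo = min(deficits)
--     hi = max(deficits)
--     while lo < hi:
--         mid = (lo + hi) // 2
--         if sum(1 for x in deficits if x <= mid) >= t:
--             hi = mid
--         else:
--             lo = mid + 1
--     d = lo
--     cnt_less = 0
--     sum_less = 0
--     for x in deficits:
--         if x < d:
--             cnt_less += 1
--             sum_less += x
--     return sum_less + (t - cnt_less) * d
-- ===== Notes on version B (the rewrite author's own statement) =====
-- stated objective: alternative
-- what changed: Replaces sort-then-prefix-sum with a sort-free selection: binary search over the deficit VALUE range for the t-th smallest deficit, then one accumulating pass summing all smaller deficits plus the needed copies of that value; the deficit list is built by a comprehension and the required count by the closed form (n+1)//2.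
import Mathlib
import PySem

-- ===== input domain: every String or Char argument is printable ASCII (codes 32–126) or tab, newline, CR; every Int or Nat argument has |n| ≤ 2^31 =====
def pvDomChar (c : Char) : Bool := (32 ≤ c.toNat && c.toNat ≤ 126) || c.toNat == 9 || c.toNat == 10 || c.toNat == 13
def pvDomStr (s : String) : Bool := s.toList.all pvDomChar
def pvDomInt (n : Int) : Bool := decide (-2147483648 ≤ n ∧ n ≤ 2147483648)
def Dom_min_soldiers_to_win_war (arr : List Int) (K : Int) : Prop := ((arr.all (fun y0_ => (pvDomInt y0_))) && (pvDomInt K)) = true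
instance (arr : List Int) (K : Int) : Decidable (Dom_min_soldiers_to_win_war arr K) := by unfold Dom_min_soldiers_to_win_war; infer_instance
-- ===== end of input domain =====

-- B replaces A's full sort + prefix-sum by a sort-free selection (binary search by value for the t-th smallest deficit, then one summing pass); alternative, not claimed faster.

-- ===== PORT A =====
def min_soldiers_to_win_war (arr : List Int) (K : Int) : Int :=
  let n : Int := arr.length
  -- the for-loop accumulating (count, a)
  let st := arr.foldl (fun (s : Int × List Int) x =>
      if PySem.Int.mod x K = 0 then (s.1 + 1, s.2)
      else (s.1, s.2 ++ [K - PySem.Int.mod x K])) ((0 : Int), ([] : List Int))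
  let count := st.1
  let a := PySem.List.sorted st.2 id false
  let required :=
    if PySem.Int.mod n 2 = 0 then PySem.Int.floordiv n 2
    else PySem.Int.floordiv n 2 + 1
  if count ≥ required then 0
  else (PySem.List.slice a none (some (required - count))).sum

-- ===== PORT B =====
-- binary search helper: smallest d in [lo, hi] with at least t deficits ≤ d (B's while-loop)
def bsearchD (deficits : List Int) (t : Int) (lo hi : Int) : Int :=
  if lo < hi then
    let mid := PySem.Int.floordiv (lo + hi) 2
    if t ≤ ((deficits.filter (fun x => x ≤ mid)).length : Int)
    then bsearchD deficits t lo mid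
    else bsearchD deficits t (mid + 1) hi
  else lo
termination_by (hi - lo).toNat
decreasing_by
  all_goals
    have hb := PySem.Int.floordiv_two_mid_bounds (le_of_lt (by assumption : lo < hi))
    have hlt : PySem.Int.floordiv (lo + hi) 2 < hi :=
      (PySem.Int.floordiv_lt_iff_lt_mul (by omega)).mpr (by omega)
    omega

def min_soldiers_to_win_war_alt (arr : List Int) (K : Int) : Int :=
  let n : Int := arr.length
  let deficits := (arr.filter (fun x => PySem.Int.mod x K ≠ 0)).map
      (fun x => K - PySem.Int.mod x K)
  let count : Int := n - deficits.length
  let required := PySem.Int.floordiv (n + 1) 2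
  let t := required - count
  if t ≤ 0 then 0
  else
    -- min(deficits) / max(deficits); deficits is nonempty whenever this branch runs
    let lo := (PySem.List.min? deficits (fun x => x)).getD 0
    let hi := (PySem.List.max? deficits (fun x => x)).getD 0
    let d := bsearchD deficits t lo hi
    -- the final single pass accumulating (cnt_less, sum_less)
    let st := deficits.foldl
      (fun (s : Int × Int) x => if x < d then (s.1 + 1, s.2 + x) else s) ((0 : Int), (0 : Int))
    st.2 + (t - st.1) * d

-- ===== PRECONDITION & SPEC =====
-- Pre_ excludes exactly K = 0, on which Python's '%' raises ZeroDivisionError (in A and in B alike).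
def Pre_min_soldiers_to_win_war (_arr : List Int) (K : Int) : Prop := K ≠ 0
instance (_arr : List Int) (K : Int) : Decidable (Pre_min_soldiers_to_win_war _arr K) := by unfold Pre_min_soldiers_to_win_war; infer_instance
def pvWitness_min_soldiers_to_win_war : List Int × Int := ([1, 2, 3], 2)

def Spec_min_soldiers_to_win_war (arr : List Int) (K : Int) (out : Int) : Prop := out = min_soldiers_to_win_war_alt arr K
instance (arr : List Int) (K : Int) (out : Int) : Decidable (Spec_min_soldiers_to_win_war arr K out) := by unfold Spec_min_soldiers_to_win_war; infer_instance

-- ===== CLAIM (what is proved, stated in full; the proofs are below) =====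
def Claim_equal_min_soldiers_to_win_war : Prop := ∀ (arr : List Int) (K : Int), Dom_min_soldiers_to_win_war arr K → Pre_min_soldiers_to_win_war arr K → Spec_min_soldiers_to_win_war arr K (min_soldiers_to_win_war arr K)

-- ===== LEMMAS AND PROOFS =====

-- three-way partition of a sorted list around a pivot p
theorem pv_sort_decomp (l : List Int) (p : Int) :
    PySem.List.sorted l id false
      = PySem.List.sorted (l.filter (fun x => x < p)) id false
        ++ List.replicate (l.count p) p
        ++ PySem.List.sorted (l.filter (fun x => p < x)) id false := by
  have hEq : l.filter (fun x => x == p) = List.replicate (l.count p) p := List.filter_beq p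
  -- permutation
  have h1 : (l.filter (fun x => x < p) ++ l.filter (fun x => !decide (x < p))).Perm l :=
    List.filter_append_perm _ l
  have h2 : ((l.filter (fun x => !decide (x < p))).filter (fun x => x == p)
      ++ (l.filter (fun x => !decide (x < p))).filter (fun x => !(x == p))).Perm
      (l.filter (fun x => !decide (x < p))) := List.filter_append_perm _ _
  have e1 : (l.filter (fun x => !decide (x < p))).filter (fun x => x == p)
      = l.filter (fun x => x == p) := by
    rw [List.filter_filter]
    apply List.filter_congr
    intro x _
    by_cases h : x = p <;> simp [h]
  have e2 : (l.filter (fun x => !decide (x < p))).filter (fun x => !(x == p))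
      = l.filter (fun x => p < x) := by
    rw [List.filter_filter]
    apply List.filter_congr
    intro x _
    by_cases h : x = p <;> by_cases h2 : p < x <;> simp [h, h2] <;> omega
  have hperm : (PySem.List.sorted (l.filter (fun x => x < p)) id false
        ++ List.replicate (l.count p) p
        ++ PySem.List.sorted (l.filter (fun x => p < x)) id false).Perm l := by
    have pa : (PySem.List.sorted (l.filter (fun x => x < p)) id false
        ++ List.replicate (l.count p) p
        ++ PySem.List.sorted (l.filter (fun x => p < x)) id false).Perm
        (l.filter (fun x => x < p) ++ (l.filter (fun x => x == p) ++ l.filter (fun x => p < x))) := by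
      rw [List.append_assoc, ← hEq]
      exact List.Perm.append (PySem.List.sorted_perm _ _ _)
        (List.Perm.append (List.Perm.refl _) (PySem.List.sorted_perm _ _ _))
    have pb : (l.filter (fun x => x < p) ++ (l.filter (fun x => x == p) ++ l.filter (fun x => p < x))).Perm l := by
      rw [← e1, ← e2]
      exact (List.Perm.append (List.Perm.refl _) h2).trans h1
    exact pa.trans pb
  -- sortedness
  have hsl := PySem.List.sorted_pairwise (xs := l) (key := id)
  have hsa := PySem.List.sorted_pairwise (xs := l.filter (fun x => x < p)) (key := id)
  have hsh := PySem.List.sorted_pairwise (xs := l.filter (fun x => p < x)) (key := id)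
  have hmemA : ∀ x ∈ PySem.List.sorted (l.filter (fun x => x < p)) id false, x < p := by
    intro x hx
    rw [PySem.List.mem_sorted] at hx
    simpa using (List.of_mem_filter hx)
  have hmemH : ∀ x ∈ PySem.List.sorted (l.filter (fun x => p < x)) id false, p < x := by
    intro x hx
    rw [PySem.List.mem_sorted] at hx
    simpa using (List.of_mem_filter hx)
  have hsorted : (PySem.List.sorted (l.filter (fun x => x < p)) id false
        ++ List.replicate (l.count p) p
        ++ PySem.List.sorted (l.filter (fun x => p < x)) id false).Pairwise (· ≤ ·) := by
    rw [List.pairwise_append, List.pairwise_append]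
    refine ⟨⟨by simpa using hsa, List.pairwise_replicate.mpr (Or.inr le_rfl), ?_⟩, ?_, ?_⟩
    · intro a ha b hb
      have := List.eq_of_mem_replicate hb
      subst this
      exact le_of_lt (hmemA a ha)
    · simpa using hsh
    · intro a ha b hb
      rcases List.mem_append.mp ha with h | h
      · exact le_of_lt (lt_trans (hmemA a h) (hmemH b hb))
      · have := List.eq_of_mem_replicate h
        subst this
        exact le_of_lt (hmemH b hb)
  exact List.Perm.eq_of_pairwise (fun a b _ _ h1 h2 => le_antisymm h1 h2)
    (by simpa using hsl) hsorted ((PySem.List.sorted_perm _ _ _).trans hperm.symm)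

-- counting x ≤ d splits into counting x < d plus multiplicity of d
theorem pv_cnt_split (l : List Int) (d : Int) :
    (l.filter (fun x => x ≤ d)).length = (l.filter (fun x => x < d)).length + l.count d := by
  induction l with
  | nil => simp
  | cons y ys ih =>
    by_cases h : y = d
    · subst h
      simp [ih]
      omega
    · by_cases h2 : y < d <;> by_cases h3 : y ≤ d <;>
        simp [h, h2, h3, ih] <;> omega

-- x ≤ d - 1 is x < d on integers
theorem pv_cnt_pred (l : List Int) (d : Int) :
    l.filter (fun x => x ≤ d - 1) = l.filter (fun x => x < d) := by
  apply List.filter_congr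
  intro x _
  by_cases h : x < d <;> simp [h]

-- the binary search returns the t-th smallest value: t ≤ #{x ≤ d} and #{x ≤ d - 1} < t
theorem pv_bsearch_inv (l : List Int) (t : Int) :
    ∀ (k : Nat) (lo hi : Int), (hi - lo).toNat = k → lo ≤ hi →
      t ≤ ((l.filter (fun x => x ≤ hi)).length : Int) →
      ((l.filter (fun x => x ≤ lo - 1)).length : Int) < t →
      t ≤ ((l.filter (fun x => x ≤ bsearchD l t lo hi)).length : Int) ∧
        ((l.filter (fun x => x ≤ bsearchD l t lo hi - 1)).length : Int) < t := by
  intro k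
  induction k using Nat.strong_induction_on with
  | _ k ih =>
    intro lo hi hk hle hhi hlo
    rw [bsearchD]
    by_cases h : lo < hi
    · simp only [h, if_true]
      have hb := PySem.Int.floordiv_two_mid_bounds hle
      have hlt : PySem.Int.floordiv (lo + hi) 2 < hi :=
        (PySem.Int.floordiv_lt_iff_lt_mul (by omega)).mpr (by omega)
      set mid := PySem.Int.floordiv (lo + hi) 2 with hmid
      by_cases hc : t ≤ ((l.filter (fun x => x ≤ mid)).length : Int)
      · simp only [hc, if_true]
        exact ih (mid - lo).toNat (by omega) lo mid rfl (by omega) hc hlo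
      · simp only [hc, if_false]
        exact ih (hi - (mid + 1)).toNat (by omega) (mid + 1) hi rfl (by omega) hhi
          (by simpa using not_le.mp hc)
    · simp only [h, if_false]
      have : lo = hi := by omega
      subst this
      exact ⟨hhi, hlo⟩

-- B's final accumulating pass, in closed form
theorem pv_fold2 (d : Int) (l : List Int) : ∀ (c s : Int),
    l.foldl (fun (st : Int × Int) x => if x < d then (st.1 + 1, st.2 + x) else st) (c, s)
      = (c + ((l.filter (fun x => x < d)).length : Int), s + (l.filter (fun x => x < d)).sum) := by
  induction l with
  | nil => simp
  | cons y ys ih =>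
    intro c s
    by_cases h : y < d
    · simp [h, ih]
      constructor <;> ring
    · simp [h, ih]

-- sum of the t smallest elements, given the t-th smallest value d
theorem pv_take_sum (l : List Int) (d : Int) (t : Nat)
    (h1 : (l.filter (fun x => x < d)).length < t)
    (h2 : t ≤ (l.filter (fun x => x < d)).length + l.count d) :
    ((PySem.List.sorted l id false).take t).sum
      = (l.filter (fun x => x < d)).sum
        + ((t - (l.filter (fun x => x < d)).length : Nat) : Int) * d := by
  have hdecomp := pv_sort_decomp l d
  set lo := l.filter (fun x => decide (x < d)) with hlo
  set c := l.count d with hc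
  have hAlen : (PySem.List.sorted lo id false).length = lo.length := PySem.List.length_sorted _ _ _
  have hsumA : (PySem.List.sorted lo id false).sum = lo.sum :=
    (PySem.List.sorted_perm lo id false).sum_eq
  rw [hdecomp,
      List.take_append_of_le_length (by rw [List.length_append, hAlen, List.length_replicate]; omega),
      List.take_append, List.take_of_length_le (by omega),
      List.take_replicate, List.sum_append, List.sum_replicate, hAlen, hsumA]
  have hmin : min (t - lo.length) c = t - lo.length := by omega
  rw [hmin, nsmul_eq_mul]

-- the two sides of the final branch agree, for any d bracketed by the binary search
theorem pv_final (defs : List Int) (t : Int) (d : Int)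
    (hd1 : t ≤ ((defs.filter (fun x => x ≤ d)).length : Int))
    (hd2 : ((defs.filter (fun x => x ≤ d - 1)).length : Int) < t) :
    ((PySem.List.sorted defs id false).take t.toNat).sum
      = (defs.foldl (fun (s : Int × Int) x => if x < d then (s.1 + 1, s.2 + x) else s)
          ((0 : Int), (0 : Int))).2
        + (t - (defs.foldl (fun (s : Int × Int) x => if x < d then (s.1 + 1, s.2 + x) else s)
          ((0 : Int), (0 : Int))).1) * d := by
  rw [pv_cnt_pred] at hd2
  rw [pv_cnt_split] at hd1
  rw [pv_fold2 d defs 0 0]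
  have hlt2 : ((defs.filter (fun x => x < d)).length) < t.toNat := by omega
  have hle2 : t.toNat ≤ (defs.filter (fun x => x < d)).length + defs.count d := by omega
  rw [pv_take_sum defs d t.toNat hlt2 hle2]
  have hcast : ((t.toNat - (defs.filter (fun x => x < d)).length : Nat) : Int)
      = t - ((defs.filter (fun x => x < d)).length : Int) := by omega
  rw [hcast]
  ring

theorem pv_foldA (K : Int) (arr : List Int) : ∀ (c : Int) (acc : List Int),
    arr.foldl (fun (s : Int × List Int) x =>
      if PySem.Int.mod x K = 0 then (s.1 + 1, s.2)
      else (s.1, s.2 ++ [K - PySem.Int.mod x K])) (c, acc)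
    = (c + ((arr.filter (fun x => PySem.Int.mod x K = 0)).length : Int),
       acc ++ (arr.filter (fun x => PySem.Int.mod x K ≠ 0)).map (fun x => K - PySem.Int.mod x K)) := by
  induction arr with
  | nil => simp
  | cons x xs ih =>
    intro c acc
    by_cases h : PySem.Int.mod x K = 0
    · simp [List.foldl_cons, h, ih]
      ring_nf
    · simp [List.foldl_cons, h, ih]

-- ===== VERDICT (by name: the statement is the Claim_ definition above) =====
theorem min_soldiers_to_win_war_spec : Claim_equal_min_soldiers_to_win_war := by
  intro arr K _ _
  unfold Spec_min_soldiers_to_win_war min_soldiers_to_win_war min_soldiers_to_win_war_alt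
  rw [pv_foldA K arr 0 []]
  simp only [List.nil_append, List.length_map, zero_add]
  set defs := (arr.filter (fun x => PySem.Int.mod x K ≠ 0)).map (fun x => K - PySem.Int.mod x K) with hdefs
  set c0 := (arr.filter (fun x => decide (PySem.Int.mod x K = 0))).length with hc0
  have hpartlen : c0 + defs.length = arr.length := by
    have h := (List.filter_append_perm (fun x => decide (PySem.Int.mod x K = 0)) arr).length_eq
    rw [List.length_append] at h
    have hnot : arr.filter (fun x => !decide (PySem.Int.mod x K = 0))
        = arr.filter (fun x => PySem.Int.mod x K ≠ 0) := by
      apply List.filter_congr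
      intro x _
      simp
    rw [hnot] at h
    simp only [hdefs, List.length_map, hc0]
    simpa using h
  have hreq : (if PySem.Int.mod (arr.length : Int) 2 = 0 then PySem.Int.floordiv (arr.length : Int) 2
      else PySem.Int.floordiv (arr.length : Int) 2 + 1)
      = PySem.Int.floordiv ((arr.length : Int) + 1) 2 := by
    rw [PySem.Int.mod_eq_emod_of_pos (by omega), PySem.Int.floordiv_eq_ediv_of_pos (by omega),
        PySem.Int.floordiv_eq_ediv_of_pos (by omega)]
    by_cases hpar : ((arr.length : Int)) % 2 = 0 <;> simp [hpar] <;> omega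
  rw [hreq]
  have hlm : defs.length = (arr.filter (fun x => decide (PySem.Int.mod x K ≠ 0))).length := by
    simp [hdefs]
  have hcnt : (arr.length : Int)
      - ((arr.filter (fun x => decide (PySem.Int.mod x K ≠ 0))).length : Int) = (c0 : Int) := by
    omega
  rw [hcnt]
  set req := PySem.Int.floordiv ((arr.length : Int) + 1) 2 with hr
  by_cases hge : (c0 : Int) ≥ req
  · have hle : req - (c0 : Int) ≤ 0 := by omega
    simp [hge, hle]
  · have hgt : ¬ (req - (c0 : Int) ≤ 0) := by omega
    rw [if_neg hge, if_neg hgt, PySem.List.slice_to _ (b := req - (c0 : Int)) (by omega)]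
    set t := req - (c0 : Int) with hT
    -- t ≤ |deficits| (so deficits is nonempty)
    have hreqn : req ≤ (arr.length : Int) := by
      have := (PySem.Int.floordiv_lt_iff_lt_mul (a := (arr.length : Int) + 1)
        (b := 2) (q := (arr.length : Int) + 1) (by omega)).mpr (by omega)
      omega
    have htlen : t ≤ (defs.length : Int) := by omega
    have hne : defs ≠ [] := by
      intro hnil
      rw [hnil] at htlen
      simp at htlen
      omega
    -- min and max of deficits
    obtain ⟨m, hm⟩ := Option.ne_none_iff_exists'.mp
      (fun h0 => hne ((PySem.List.min?_eq_none_iff defs (fun x : Int => x)).mp h0))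
    obtain ⟨M, hM⟩ := Option.ne_none_iff_exists'.mp
      (fun h0 => hne ((PySem.List.max?_eq_none_iff defs (fun x : Int => x)).mp h0))
    have hmmem := PySem.List.min?_mem hm
    have hmin := PySem.List.min?_isMin hm
    have hmax := PySem.List.max?_isMax hM
    have hmM : m ≤ M := hmax m hmmem
    -- the binary search brackets the t-th smallest value d
    have hinit1 : t ≤ ((defs.filter (fun x => x ≤ M)).length : Int) := by
      rw [List.filter_eq_self.mpr (fun x hx => by simpa using hmax x hx)]
      omega
    have hinit2 : ((defs.filter (fun x => x ≤ m - 1)).length : Int) < t := by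
      rw [List.filter_eq_nil_iff.mpr (fun x hx => by
        have := hmin x hx
        simp only [decide_eq_true_eq]
        omega)]
      simp
      omega
    have hd := pv_bsearch_inv defs t (M - m).toNat m M rfl hmM hinit1 hinit2
    rw [hm, hM]
    simp only [Option.getD_some]
    obtain ⟨hd1, hd2⟩ := hd
    exact pv_final defs t _ hd1 hd2
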